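-- pv_equiv track=rewrite | github.com/demeet2k/athena-square-earth | self_actualize/mycelium_brain/toolkit/command_protocol/quest_promotion.py | _best_lane
-- ===== SOURCE A (Python) =====
-- from typing import Any
--
-- TEMPLE_LANES = ["M1-SYNTH", "M2-PLAN", "Athena-A", "M4-PRUNE"]
--
-- HALL_LANES = ["M3-WORK", "Athena-G", "Athena-P", "A2", "A6", "A8", "M4-PRUNE"]
--
-- def _best_lane(plane: str, route_receipt: dict[str, Any] | None) -> str:
--     if route_receipt:
--         selected = route_receipt.get("selected_targets", [])
--         preferred = TEMPLE_LANES if plane == "temple" else HALL_LANES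
--         for candidate in preferred:
--             if candidate in selected:
--                 return candidate
--         if selected:
--             return selected[0]
--     return "M2-PLAN" if plane == "temple" else "M3-WORK"
-- ===== SOURCE B (Python) =====
-- TEMPLE_LANES = ["M1-SYNTH", "M2-PLAN", "Athena-A", "M4-PRUNE"]
--
-- HALL_LANES = ["M3-WORK", "Athena-G", "Athena-P", "A2", "A6", "A8", "M4-PRUNE"]
--
-- def _best_lane(plane, route_receipt):
--     if route_receipt:
--         selected = route_receipt.get("selected_targets", [])
--         if selected:
--             preferred = TEMPLE_LANES if plane == "temple" else HALL_LANES
--             rank = {lane: i for i, lane in enumerate(preferred)}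
--             return min(selected, key=lambda x: rank.get(x, len(preferred)))
--     return "M2-PLAN" if plane == "temple" else "M3-WORK"
-- ===== Notes on version B (the rewrite author's own statement) =====
-- stated objective: alternative
-- what changed: Replaces the scan over the preferred list with an inner membership test on selected by a rank dictionary built once and a single min-by-rank pass over selected (absent lanes rank len(preferred), min's first-wins tie-breaking reproduces the selected[0] fallback).
import Mathlib
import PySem

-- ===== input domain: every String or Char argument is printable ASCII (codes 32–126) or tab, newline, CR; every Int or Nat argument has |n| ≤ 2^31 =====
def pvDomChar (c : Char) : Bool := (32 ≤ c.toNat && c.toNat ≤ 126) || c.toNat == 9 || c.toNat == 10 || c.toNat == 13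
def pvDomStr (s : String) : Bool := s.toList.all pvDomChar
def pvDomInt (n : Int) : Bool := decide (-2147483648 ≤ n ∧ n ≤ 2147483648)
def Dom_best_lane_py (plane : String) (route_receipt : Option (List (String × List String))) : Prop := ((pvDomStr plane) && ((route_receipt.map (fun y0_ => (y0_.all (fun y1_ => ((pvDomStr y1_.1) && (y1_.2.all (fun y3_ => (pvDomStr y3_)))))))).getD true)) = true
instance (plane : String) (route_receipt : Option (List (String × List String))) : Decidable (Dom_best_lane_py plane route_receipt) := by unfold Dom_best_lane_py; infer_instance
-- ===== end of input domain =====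

-- B replaces A's scan over the preferred list (with an inner membership test on selected)
-- by a rank index over preferred and a single min-by-rank pass over selected: alternative decomposition, same cost class.

def TEMPLE_LANES : List String := ["M1-SYNTH", "M2-PLAN", "Athena-A", "M4-PRUNE"]

def HALL_LANES : List String := ["M3-WORK", "Athena-G", "Athena-P", "A2", "A6", "A8", "M4-PRUNE"]

-- ===== PORT A =====
-- literal transliteration of A: `if route_receipt:` (non-None and non-empty dict), scan preferred
-- in order returning the first candidate contained in selected, else selected[0] if selected truthy,
-- else (and on a falsy receipt) the plane default; early returns modeled with Option.
def best_lane_py (plane : String) (route_receipt : Option (List (String × List String))) : String :=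
  let early : Option String :=
    match route_receipt with
    | some d =>
      if d ≠ [] then
        let selected := (PySem.Dict.mk d).getD "selected_targets" []
        let preferred := if plane = "temple" then TEMPLE_LANES else HALL_LANES
        match preferred.find? (fun candidate => selected.contains candidate) with
        | some candidate => some candidate
        | none =>
          match selected with
          | s0 :: _ => some s0
          | [] => none
      else none
    | none => none
  match early with
  | some r => r
  | none => if plane = "temple" then "M2-PLAN" else "M3-WORK"

-- ===== PORT B =====
-- transliteration of B: rank lanes by their index in preferred (absent = preferred.length, which is
-- exactly List.idxOf, the meaning of B's `rank.get(x, len(preferred))` for the nodup enumerate dict),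
-- then Python's min(selected, key=rank) = left fold keeping the first element of minimal rank.
def best_lane_py_alt (plane : String) (route_receipt : Option (List (String × List String))) : String :=
  match route_receipt with
  | some d =>
    if d ≠ [] then
      let selected := (PySem.Dict.mk d).getD "selected_targets" []
      match selected with
      | s0 :: rest =>
        let preferred := if plane = "temple" then TEMPLE_LANES else HALL_LANES
        rest.foldl (fun best x => if preferred.idxOf x < preferred.idxOf best then x else best) s0
      | [] => if plane = "temple" then "M2-PLAN" else "M3-WORK"
    else if plane = "temple" then "M2-PLAN" else "M3-WORK"
  | none => if plane = "temple" then "M2-PLAN" else "M3-WORK"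

-- ===== PRECONDITION & SPEC =====
def Spec_best_lane_py (plane : String) (route_receipt : Option (List (String × List String))) (out : String) : Prop := out = best_lane_py_alt plane route_receipt
instance (plane : String) (route_receipt : Option (List (String × List String))) (out : String) : Decidable (Spec_best_lane_py plane route_receipt out) := by unfold Spec_best_lane_py; infer_instance

-- ===== CLAIM (what is proved, stated in full; the proofs are below) =====
def Claim_equal_best_lane_py : Prop := ∀ (plane : String) (route_receipt : Option (List (String × List String))), Dom_best_lane_py plane route_receipt → Spec_best_lane_py plane route_receipt (best_lane_py plane route_receipt)

-- ===== LEMMAS AND PROOFS =====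

-- at equal ranks below |P|, the ranked elements coincide
theorem idxOf_inj_of_lt (P : List String) (a b : String)
    (ha : P.idxOf a < P.length) (heq : P.idxOf a = P.idxOf b) : a = b := by
  have hb : P.idxOf b < P.length := heq ▸ ha
  have h1 : P[P.idxOf a]? = some a := by
    rw [List.getElem?_eq_getElem ha, List.getElem_idxOf ha]
  have h2 : P[P.idxOf b]? = some b := by
    rw [List.getElem?_eq_getElem hb, List.getElem_idxOf hb]
  rw [heq, h2] at h1
  injection h1 with h1
  exact h1.symm

-- B's fold either keeps its seed (nothing in the tail ranks strictly better) or returns a tail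
-- element of rank < |P| that is minimal over seed and tail.
theorem foldl_rank_char (P : List String) (t : List String) : ∀ (b : String),
    (t.foldl (fun best x => if P.idxOf x < P.idxOf best then x else best) b = b
      ∧ ∀ y ∈ t, P.idxOf b ≤ P.idxOf y)
    ∨ (∃ r, t.foldl (fun best x => if P.idxOf x < P.idxOf best then x else best) b = r
      ∧ r ∈ t ∧ P.idxOf r < P.length ∧ ∀ y ∈ b :: t, P.idxOf r ≤ P.idxOf y) := by
  induction t with
  | nil => exact fun b => Or.inl ⟨rfl, by simp⟩
  | cons x t ih =>
    intro b
    simp only [List.foldl_cons]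
    by_cases hx : P.idxOf x < P.idxOf b
    · simp only [if_pos hx]
      rcases ih x with ⟨heq, hmin⟩ | ⟨r, heq, hr, hlt, hmin⟩
      · refine Or.inr ⟨x, heq, List.mem_cons_self, lt_of_lt_of_le hx List.idxOf_le_length, ?_⟩
        intro y hy
        rcases List.mem_cons.mp hy with rfl | hy
        · exact le_of_lt hx
        · rcases List.mem_cons.mp hy with rfl | hy
          · exact le_refl _
          · exact hmin y hy
      · refine Or.inr ⟨r, heq, List.mem_cons_of_mem x hr, hlt, ?_⟩
        intro y hy
        rcases List.mem_cons.mp hy with rfl | hy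
        · exact le_trans (hmin x List.mem_cons_self) (le_of_lt hx)
        · exact hmin y hy
    · simp only [if_neg hx]
      rcases ih b with ⟨heq, hmin⟩ | ⟨r, heq, hr, hlt, hmin⟩
      · refine Or.inl ⟨heq, ?_⟩
        intro y hy
        rcases List.mem_cons.mp hy with rfl | hy
        · omega
        · exact hmin y hy
      · refine Or.inr ⟨r, heq, List.mem_cons_of_mem x hr, hlt, ?_⟩
        intro y hy
        rcases List.mem_cons.mp hy with rfl | hy
        · exact hmin _ List.mem_cons_self
        · rcases List.mem_cons.mp hy with rfl | hy
          · exact le_trans (hmin _ List.mem_cons_self) (le_of_not_gt hx)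
          · exact hmin y (List.mem_cons_of_mem _ hy)

-- A's find? over preferred returns a member of S of minimal rank.
theorem find_some_min (P S : List String) (c : String)
    (h : P.find? (fun p => S.contains p) = some c) :
    c ∈ P ∧ c ∈ S ∧ ∀ y ∈ S, P.idxOf c ≤ P.idxOf y := by
  induction P with
  | nil => simp at h
  | cons p P ih =>
    cases hp : S.contains p
    · simp only [List.find?_cons, hp] at h
      obtain ⟨hcP, hcS, hmin⟩ := ih h
      have hcp : c ≠ p := by
        rintro rfl
        rw [List.contains_eq_mem, decide_eq_false_iff_not] at hp
        exact hp hcS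
      refine ⟨List.mem_cons_of_mem p hcP, hcS, ?_⟩
      intro y hy
      have hyp : y ≠ p := by
        rintro rfl
        rw [List.contains_eq_mem, decide_eq_false_iff_not] at hp
        exact hp hy
      have e1 : (p == c) = false := beq_eq_false_iff_ne.mpr (Ne.symm hcp)
      have e2 : (p == y) = false := beq_eq_false_iff_ne.mpr (Ne.symm hyp)
      simp only [List.idxOf_cons, e1, e2, cond_false]
      exact Nat.succ_le_succ (hmin y hy)
    · simp only [List.find?_cons, hp] at h
      injection h with h
      subst h
      refine ⟨List.mem_cons_self, by simpa using hp, ?_⟩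
      intro y hy
      simp [List.idxOf_cons]

-- If A's find? fails, no element of S occurs in preferred.
theorem find_none (P S : List String)
    (h : P.find? (fun p => S.contains p) = none) :
    ∀ y ∈ S, y ∉ P := by
  intro y hyS hyP
  have h1 := List.find?_eq_none.mp h y hyP
  have h2 : y ∉ S := by simpa using h1
  exact h2 hyS

-- Core: B's fold over a nonempty selected equals A's first-preferred-else-head rule.
theorem foldl_eq_find (P : List String) (s0 : String) (t : List String) :
    t.foldl (fun best x => if P.idxOf x < P.idxOf best then x else best) s0
    = (match P.find? (fun c => (s0 :: t).contains c) with
       | some c => c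
       | none => s0) := by
  cases hf : P.find? (fun c => (s0 :: t).contains c) with
  | none =>
    have hnone := find_none P (s0 :: t) hf
    rcases foldl_rank_char P t s0 with ⟨heq, _⟩ | ⟨r, heq, hr, hlt, _⟩
    · exact heq
    · exfalso
      have hrP : r ∈ P := by
        have hg := List.getElem_idxOf hlt
        exact hg ▸ List.getElem_mem hlt
      exact hnone r (List.mem_cons_of_mem s0 hr) hrP
  | some c =>
    obtain ⟨hcP, hcS, hmin⟩ := find_some_min P (s0 :: t) c hf
    have hclt : P.idxOf c < P.length := List.idxOf_lt_length_of_mem hcP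
    rcases foldl_rank_char P t s0 with ⟨heq, hminb⟩ | ⟨r, heq, hr, hlt, hminr⟩
    · rw [heq]
      show s0 = c
      rcases List.mem_cons.mp hcS with rfl | hc
      · rfl
      · have h1 : P.idxOf s0 ≤ P.idxOf c := hminb c hc
        have h2 : P.idxOf c ≤ P.idxOf s0 := hmin s0 List.mem_cons_self
        exact idxOf_inj_of_lt P s0 c (by omega) (le_antisymm h1 h2)
    · rw [heq]
      show r = c
      have h1 : P.idxOf r ≤ P.idxOf c := hminr c hcS
      have h2 : P.idxOf c ≤ P.idxOf r := hmin r (List.mem_cons_of_mem s0 hr)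
      exact idxOf_inj_of_lt P r c hlt (le_antisymm h1 h2)

-- ===== VERDICT (by name: the statement is the Claim_ definition above) =====
theorem best_lane_py_spec : Claim_equal_best_lane_py := by
  intro plane route_receipt _
  unfold Spec_best_lane_py best_lane_py best_lane_py_alt
  cases route_receipt with
  | none => rfl
  | some d =>
    by_cases hd : d = []
    · simp [hd]
    · simp only [ne_eq, hd, not_false_eq_true, if_true]
      cases hsel : (PySem.Dict.mk d).getD "selected_targets" [] with
      | nil =>
        rw [List.find?_eq_none.mpr (fun x _ => by simp)]
      | cons s0 t =>
        have key := foldl_eq_find (if plane = "temple" then TEMPLE_LANES else HALL_LANES) s0 t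
        cases hf : (if plane = "temple" then TEMPLE_LANES else HALL_LANES).find?
            (fun candidate => (s0 :: t).contains candidate) with
        | none => rw [hf] at key; exact key.symm
        | some c => rw [hf] at key; exact key.symm
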